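-- pv_equiv track=rewrite | github.com/THIndustries/PythonBatteries | 03_collections/Counter/ex09.py | count_min_goals
-- ===== SOURCE A (Python) =====
-- from collections import Counter
--
-- def count_min_goals(stats: dict) -> Counter:
--     # Инициализируем счетчик для хранения минимальных голов
--     min_goals = Counter()
--
--     # Проходим по всем годам и их статистике
--     for year, players in stats.items():
--         # Обновляем минимальные значения для каждого игрока
--         for player, goals in players.items():
--             if player not in min_goals:
--                 min_goals[player] = goals  # Если игрока нет, добавляем его
--             else:
--                 min_goals[player] = min(min_goals[player], goals)  # Сравниваем и сохраняем минимум
--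
--     return min_goals
-- ===== SOURCE B (Python) =====
-- from collections import Counter
--
-- def count_min_goals(stats: dict) -> Counter:
--     # Phase 1: group every yearly goal count per player.
--     grouped = {}
--     for players in stats.values():
--         for player, goals in players.items():
--             grouped.setdefault(player, []).append(goals)
--     # Phase 2: reduce each group to its minimum.
--     result = Counter()
--     for player, gs in grouped.items():
--         result[player] = min(gs)
--     return result
-- ===== Notes on version B (the rewrite author's own statement) =====
-- stated objective: alternative
-- what changed: B groups all yearly goal counts per player into lists in a first pass (dict.setdefault) and then reduces each group with min into a Counter in a second pass, instead of A's single pass maintaining a running minimum guarded by a membership test.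
import Mathlib
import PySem

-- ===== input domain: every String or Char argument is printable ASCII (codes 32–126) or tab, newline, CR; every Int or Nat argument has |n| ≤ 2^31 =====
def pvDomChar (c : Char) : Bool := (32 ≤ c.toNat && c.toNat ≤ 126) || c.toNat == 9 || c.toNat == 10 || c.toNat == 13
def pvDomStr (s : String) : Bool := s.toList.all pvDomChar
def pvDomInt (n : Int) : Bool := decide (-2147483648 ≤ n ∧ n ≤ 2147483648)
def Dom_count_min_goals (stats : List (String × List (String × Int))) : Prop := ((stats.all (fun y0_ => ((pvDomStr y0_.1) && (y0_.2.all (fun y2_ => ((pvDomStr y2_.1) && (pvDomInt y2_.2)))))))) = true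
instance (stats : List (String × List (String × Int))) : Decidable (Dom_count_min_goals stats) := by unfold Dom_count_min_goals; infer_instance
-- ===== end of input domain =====

-- B replaces A's running-minimum-with-membership-test by a two-phase group-then-reduce
-- decomposition (collect each player's yearly goals, then take min per group); objective: alternative.

-- ===== PORT A =====
-- one running-minimum step for a single (player, goals) entry of one year
def cmgStepA (mg : PySem.Dict String Int) (pg : String × Int) : PySem.Dict String Int :=
  match mg.get? pg.1 with
  | none => mg.insert pg.1 pg.2            -- player not in min_goals: add
  | some m => mg.insert pg.1 (min m pg.2)  -- min(min_goals[player], goals)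

def count_min_goals (stats : List (String × List (String × Int))) : List (String × Int) :=
  (stats.foldl (fun mg yp => yp.2.foldl cmgStepA mg) (PySem.Dict.empty : PySem.Dict String Int)).items

-- ===== PORT B =====
-- min(gs); B only calls it on nonempty gs
def pyMinList (l : List Int) : Int :=
  match l with
  | [] => 0
  | h :: t => t.foldl min h

-- grouped.setdefault(player, []).append(goals)
def cmgStepG (g : PySem.Dict String (List Int)) (pg : String × Int) : PySem.Dict String (List Int) :=
  g.modify pg.1 [] (· ++ [pg.2])

def count_min_goals_alt (stats : List (String × List (String × Int))) : List (String × Int) :=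
  let grouped := stats.foldl (fun g yp => yp.2.foldl cmgStepG g) (PySem.Dict.empty : PySem.Dict String (List Int))
  (grouped.items.foldl (fun res pg => res.insert pg.1 (pyMinList pg.2)) (PySem.Dict.empty : PySem.Dict String Int)).items

-- ===== PRECONDITION & SPEC =====
def Spec_count_min_goals (stats : List (String × List (String × Int))) (out : List (String × Int)) : Prop := out = count_min_goals_alt stats
instance (stats : List (String × List (String × Int))) (out : List (String × Int)) : Decidable (Spec_count_min_goals stats out) := by unfold Spec_count_min_goals; infer_instance

-- ===== CLAIM (what is proved, stated in full; the proofs are below) =====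
def Claim_equal_count_min_goals : Prop := ∀ (stats : List (String × List (String × Int))), Dom_count_min_goals stats → Spec_count_min_goals stats (count_min_goals stats)

-- ===== LEMMAS AND PROOFS =====

-- the map taking B's grouping dict to A's running-minimum dict
def cmgPhi (g : PySem.Dict String (List Int)) : PySem.Dict String Int :=
  PySem.Dict.mk (g.items.map (fun pg => (pg.1, pyMinList pg.2)))

theorem cmg_nested_eq_flat {α : Type} (f : α → (String × Int) → α)
    (stats : List (String × List (String × Int))) (a : α) :
    stats.foldl (fun x yp => yp.2.foldl f x) a = (stats.flatMap (·.2)).foldl f a := by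
  induction stats generalizing a with
  | nil => rfl
  | cons h t ih => simp [List.flatMap_cons, List.foldl_append, ih]

theorem pyMinList_append (l : List Int) (v : Int) (h : l ≠ []) :
    pyMinList (l ++ [v]) = min (pyMinList l) v := by
  match l with
  | [] => exact absurd rfl h
  | x :: t => simp [pyMinList, List.foldl_append]

theorem cmgPhi_contains (g : PySem.Dict String (List Int)) (k : String) :
    (cmgPhi g).contains k = g.contains k := by
  simp [cmgPhi, PySem.Dict.contains, List.any_map, Function.comp_def]

theorem cmgPhi_get? (g : PySem.Dict String (List Int)) (k : String) :
    (cmgPhi g).get? k = (g.get? k).map pyMinList := by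
  simp [cmgPhi, PySem.Dict.get?, List.find?_map, Function.comp_def, Option.map_map]

theorem cmg_step_comm (g : PySem.Dict String (List Int)) (pg : String × Int)
    (hne : ∀ q ∈ g.items, q.2 ≠ []) :
    cmgStepA (cmgPhi g) pg = cmgPhi (cmgStepG g pg) := by
  unfold cmgStepA cmgStepG PySem.Dict.modify
  rw [cmgPhi_get?]
  cases h : g.get? pg.1 with
  | none =>
      have hc : g.contains pg.1 = false := by
        rw [PySem.Dict.contains_eq_isSome_get?, h]; rfl
      have hcp : (cmgPhi g).contains pg.1 = false := by rw [cmgPhi_contains]; exact hc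
      have hd : g.getD pg.1 [] = [] := by simp [PySem.Dict.getD, h]
      simp only [Option.map_none, hd, List.nil_append]
      apply PySem.Dict.ext
      rw [PySem.Dict.items_insert_of_not_contains _ _ hcp]
      unfold cmgPhi
      rw [PySem.Dict.items_insert_of_not_contains _ _ hc]
      simp [pyMinList]
  | some gs =>
      have hc : g.contains pg.1 = true := by
        rw [PySem.Dict.contains_eq_isSome_get?, h]; rfl
      have hcp : (cmgPhi g).contains pg.1 = true := by rw [cmgPhi_contains]; exact hc
      have hgs : gs ≠ [] := by
        have hm : (pg.1, gs) ∈ g.items := by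
          unfold PySem.Dict.get? at h
          obtain ⟨q, hq, hq2⟩ := Option.map_eq_some_iff.mp h
          have hk : q.1 = pg.1 := by simpa using List.find?_some hq
          have hq' : q = (pg.1, gs) := by cases q; simp_all
          exact hq' ▸ List.mem_of_find?_eq_some hq
        exact hne _ hm
      have hd : g.getD pg.1 [] = gs := by simp [PySem.Dict.getD, h]
      simp only [Option.map_some, hd]
      apply PySem.Dict.ext
      rw [PySem.Dict.items_insert_of_contains _ _ hcp]
      unfold cmgPhi
      rw [PySem.Dict.items_insert_of_contains _ _ hc]
      simp only [List.map_map]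
      apply List.map_congr_left
      intro q hq
      by_cases hk : q.1 = pg.1
      · simp [hk, pyMinList_append gs pg.2 hgs]
      · simp [hk]

theorem cmg_values_nonempty (pg : String × Int) (g : PySem.Dict String (List Int))
    (hne : ∀ q ∈ g.items, q.2 ≠ []) :
    ∀ q ∈ (cmgStepG g pg).items, q.2 ≠ [] := by
  intro q hq
  unfold cmgStepG PySem.Dict.modify at hq
  rcases (PySem.Dict.mem_items_insert _ _ _ _).mp hq with h | h
  · subst h; simp
  · exact hne _ h.1

theorem cmg_fold_comm (l : List (String × Int)) (g : PySem.Dict String (List Int))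
    (hne : ∀ q ∈ g.items, q.2 ≠ []) :
    l.foldl cmgStepA (cmgPhi g) = cmgPhi (l.foldl cmgStepG g) := by
  induction l generalizing g with
  | nil => rfl
  | cons p t ih =>
      simp only [List.foldl_cons]
      rw [cmg_step_comm g p hne]
      exact ih _ (cmg_values_nonempty p g hne)

theorem count_min_goals_spec : Claim_equal_count_min_goals := by
  intro stats _
  unfold Spec_count_min_goals count_min_goals count_min_goals_alt
  dsimp only
  rw [cmg_nested_eq_flat cmgStepA, cmg_nested_eq_flat cmgStepG]
  set flat := stats.flatMap (·.2) with hflat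
  have hempty : (PySem.Dict.empty : PySem.Dict String Int) = cmgPhi PySem.Dict.empty := rfl
  conv_lhs => rw [hempty]
  rw [cmg_fold_comm flat PySem.Dict.empty (by simp [PySem.Dict.empty])]
  set dG := flat.foldl cmgStepG PySem.Dict.empty with hdG
  have hnodup : dG.keys.Nodup := by
    rw [hdG]
    exact PySem.Dict.nodup_keys_foldl_modify_key flat Prod.fst []
      (fun _ pg gs => gs ++ [pg.2]) PySem.Dict.empty (by simp [PySem.Dict.empty, PySem.Dict.keys])
  have hfresh :
      (dG.items.foldl (fun res pg => res.insert pg.1 (pyMinList pg.2))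
        (PySem.Dict.empty : PySem.Dict String Int)).items
      = (PySem.Dict.empty : PySem.Dict String Int).items
        ++ dG.items.map (fun pg => (pg.1, pyMinList pg.2)) :=
    PySem.Dict.items_foldl_insert_fresh dG.items Prod.fst (fun pg => pyMinList pg.2)
      PySem.Dict.empty (by intro a _; simp [PySem.Dict.empty, PySem.Dict.contains]) hnodup
  rw [hfresh]
  rfl
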